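-- pv_equiv track=rewrite | github.com/SukumarSatapathy/My-Leetcode-Solutions | Binary Search/Find First and Last Position of Element in Sorted Array.py | findminindx
-- ===== SOURCE A (Python) =====
-- def findminindx(arr,k):
--     low = 0
--     high = len(arr) - 1
--     minidx = - 1
--     while low <= high:
--         mid = (low + high) // 2
--         if arr[mid] >= k:
--             if arr[mid] == k:
--                 minidx = mid
--             high = mid - 1
--         if arr[mid] < k:
--             low = mid + 1
--     return minidx
-- ===== SOURCE B (Python) =====
-- def findminindx(arr, k):
--     for i, x in enumerate(arr):
--         if x == k:
--             return i
--     return -1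
-- ===== Notes on version B (the rewrite author's own statement) =====
-- stated objective: simpler
-- what changed: Replaced the hand-written binary search (low/high/mid loop tracking minidx) with a single left-to-right linear scan that returns the first index equal to k, or -1; equivalence is claimed on sorted (non-decreasing) arrays, the domain a binary search is for.
-- outside the precondition, e.g. on findminindx([5, 1], 1): A returns -1, B returns 1
import Mathlib
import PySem

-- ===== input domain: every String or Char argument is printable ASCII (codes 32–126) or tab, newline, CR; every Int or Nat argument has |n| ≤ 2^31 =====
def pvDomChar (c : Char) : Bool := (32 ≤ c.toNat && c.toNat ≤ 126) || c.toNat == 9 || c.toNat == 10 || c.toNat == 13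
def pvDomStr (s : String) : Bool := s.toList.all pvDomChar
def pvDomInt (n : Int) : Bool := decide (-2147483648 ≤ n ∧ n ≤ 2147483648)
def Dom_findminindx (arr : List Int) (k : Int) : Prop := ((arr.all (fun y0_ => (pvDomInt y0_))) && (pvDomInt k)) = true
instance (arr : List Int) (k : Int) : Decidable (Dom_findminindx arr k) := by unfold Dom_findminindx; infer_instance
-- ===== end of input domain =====

-- B replaces A's hand-written binary search with a plain left-to-right linear scan (simpler); equal on sorted input.

-- ===== PORT A =====
-- A's while loop.  The two sequential `if`s test exclusive conditions (arr[mid] >= k / arr[mid] < k),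
-- so they are transliterated as if/else.  arr[mid] is always in range when reached from the entry
-- (0 ≤ low ≤ mid ≤ high ≤ len-1); pyGetD's default 0 is a totality guard only, never hit from the entry.
def findminindxLoop (arr : List Int) (k low high minidx : Int) : Int :=
  if h : low ≤ high then
    let mid := PySem.Int.floordiv (low + high) 2
    let v := PySem.List.pyGetD arr mid 0
    if v ≥ k then
      findminindxLoop arr k low (mid - 1) (if v = k then mid else minidx)
    else
      findminindxLoop arr k (mid + 1) high minidx
  else minidx
termination_by (high + 1 - low).toNat
decreasing_by
  · have := PySem.Int.floordiv_two_mid_bounds h; omega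
  · have := PySem.Int.floordiv_two_mid_bounds h; omega

def findminindx (arr : List Int) (k : Int) : Int :=
  findminindxLoop arr k 0 ((arr.length : Int) - 1) (-1)

-- ===== PORT B =====
def findminindxGo (k : Int) : List Int → Int → Int
  | [], _ => -1
  | x :: xs, i => if x = k then i else findminindxGo k xs (i + 1)

def findminindx_alt (arr : List Int) (k : Int) : Int :=
  findminindxGo k arr 0

-- ===== PRECONDITION & SPEC =====
-- Pre_ excludes unsorted arrays that contain k: there A's value is an accident of the binary-search
-- probe sequence (e.g. [5,1] with k=1 gives -1 though 1 is present); when k is absent both return -1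
-- whatever the order, so such inputs stay inside.
def Pre_findminindx (arr : List Int) (k : Int) : Prop := List.Pairwise (· ≤ ·) arr ∨ k ∉ arr
instance (arr : List Int) (k : Int) : Decidable (Pre_findminindx arr k) := by
  unfold Pre_findminindx; infer_instance

def pvWitness_findminindx : List Int × Int := ([1, 2, 2, 3], 2)

def Spec_findminindx (arr : List Int) (k : Int) (out : Int) : Prop := out = findminindx_alt arr k
instance (arr : List Int) (k : Int) (out : Int) : Decidable (Spec_findminindx arr k out) := by unfold Spec_findminindx; infer_instance

-- ===== CLAIM (what is proved, stated in full; the proofs are below) =====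
def Claim_equal_findminindx : Prop := ∀ (arr : List Int) (k : Int), Dom_findminindx arr k → Pre_findminindx arr k → Spec_findminindx arr k (findminindx arr k)

-- ===== LEMMAS AND PROOFS =====

-- B returns the first index of k (offset by the accumulator), or -1.
lemma findminindxGo_eq (k : Int) (xs : List Int) : ∀ i : Int,
    findminindxGo k xs i = if k ∈ xs then i + (xs.idxOf k : Int) else -1 := by
  induction xs with
  | nil => intro i; simp [findminindxGo]
  | cons x xs ih =>
    intro i
    by_cases hx : x = k
    · simp [findminindxGo, hx, List.idxOf_cons_self]
    · have hx' : ¬ (k = x) := fun h => hx h.symm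
      simp only [findminindxGo, if_neg hx, ih (i + 1), List.mem_cons,
        List.idxOf_cons_ne _ (by simpa using hx), hx', false_or]
      split
      · push_cast; ring
      · rfl

-- idxOf is minimal among positions holding k.
lemma idxOf_min {k : Int} : ∀ (xs : List Int) (j : Nat), (hj : j < xs.length) → xs[j] = k →
    xs.idxOf k ≤ j := by
  intro xs
  induction xs with
  | nil => simp
  | cons x xs ih =>
    intro j hj h
    by_cases hx : x = k
    · simp [hx, List.idxOf_cons_self]
    · cases j with
      | zero => exact absurd (by simpa using h) hx
      | succ j =>
        rw [List.idxOf_cons_ne _ (by simpa using hx)]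
        exact Nat.succ_le_succ (ih j (by simpa using hj) (by simpa using h))

lemma fuelLemma {low high mid : Int} {n : Nat} (hmid : low ≤ mid ∧ mid ≤ high)
    (hn : (high + 1 - low).toNat ≤ n + 1) : (high + 1 - (mid + 1)).toNat ≤ n := by omega

lemma fuelLemma' {low high mid : Int} {n : Nat} (hmid : low ≤ mid ∧ mid ≤ high)
    (hn : (high + 1 - low).toNat ≤ n + 1) : (mid - 1 + 1 - low).toNat ≤ n := by omega

-- One unfolding of the loop when low ≤ high.
lemma findminindxLoop_step (arr : List Int) (k low high minidx : Int) (h : low ≤ high) :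
    findminindxLoop arr k low high minidx =
      if PySem.List.pyGetD arr (PySem.Int.floordiv (low + high) 2) 0 ≥ k then
        findminindxLoop arr k low (PySem.Int.floordiv (low + high) 2 - 1)
          (if PySem.List.pyGetD arr (PySem.Int.floordiv (low + high) 2) 0 = k then
            PySem.Int.floordiv (low + high) 2 else minidx)
      else
        findminindxLoop arr k (PySem.Int.floordiv (low + high) 2 + 1) high minidx := by
  rw [findminindxLoop, dif_pos h]

-- The loop returns minidx when the invariants say it already is the answer.
lemma findminindxLoop_exit (arr : List Int) (k low high minidx : Int)
    (hnle : ¬ low ≤ high) (hle : low ≤ high + 1)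
    (hI2 : ∀ j : Nat, (hj : j < arr.length) → (j : Int) < low → arr[j] < k)
    (hI4 : (minidx = -1 ∧ ∀ j : Nat, (hj : j < arr.length) → high < (j : Int) → arr[j] ≠ k) ∨
        (minidx = high + 1 ∧ 0 ≤ high + 1 ∧
          ∃ hj : (high + 1).toNat < arr.length, arr[(high + 1).toNat] = k)) :
    minidx = (if k ∈ arr then (arr.idxOf k : Int) else -1) := by
  have hlh : low = high + 1 := by omega
  by_cases hk : k ∈ arr
  · have hFlt : arr.idxOf k < arr.length := List.idxOf_lt_length_of_mem hk
    have hFk : arr[arr.idxOf k] = k := List.getElem_idxOf hFlt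
    have hFge : high < (arr.idxOf k : Int) := by
      by_contra hcon
      have := hI2 (arr.idxOf k) hFlt (by omega)
      omega
    rcases hI4 with ⟨_, hne⟩ | ⟨hmi, hpos, hjlt, heq⟩
    · exact absurd hFk (hne _ hFlt hFge)
    · have hmin : arr.idxOf k ≤ (high + 1).toNat := idxOf_min arr _ hjlt heq
      have : (arr.idxOf k : Int) = high + 1 := by omega
      rw [if_pos hk, hmi, this]
  · rcases hI4 with ⟨hmi, _⟩ | ⟨_, _, hjlt, heq⟩
    · rw [if_neg hk, hmi]
    · exact absurd (heq ▸ List.getElem_mem hjlt) hk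

-- Invariant-based correctness of A's binary-search loop on a sorted array.
lemma findminindxLoop_eq (arr : List Int) (k : Int) (hs : List.Pairwise (· ≤ ·) arr) :
    ∀ (n : Nat) (low high minidx : Int), (high + 1 - low).toNat ≤ n →
      0 ≤ low → high ≤ (arr.length : Int) - 1 → low ≤ high + 1 →
      (∀ j : Nat, (hj : j < arr.length) → (j : Int) < low → arr[j] < k) →
      (∀ j : Nat, (hj : j < arr.length) → high < (j : Int) → k ≤ arr[j]) →
      ((minidx = -1 ∧ ∀ j : Nat, (hj : j < arr.length) → high < (j : Int) → arr[j] ≠ k) ∨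
        (minidx = high + 1 ∧ 0 ≤ high + 1 ∧
          ∃ hj : (high + 1).toNat < arr.length, arr[(high + 1).toNat] = k)) →
      findminindxLoop arr k low high minidx =
        (if k ∈ arr then (arr.idxOf k : Int) else -1) := by
  have hsort := List.pairwise_iff_getElem.mp hs
  intro n
  induction n with
  | zero =>
    intro low high minidx hn h0 hhi hle hI2 hI3 hI4
    have hnle : ¬ low ≤ high := by omega
    rw [findminindxLoop, dif_neg hnle]
    exact findminindxLoop_exit arr k low high minidx hnle hle hI2 hI4
  | succ n ih =>
    intro low high minidx hn h0 hhi hle hI2 hI3 hI4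
    by_cases h : low ≤ high
    · have hmid := PySem.Int.floordiv_two_mid_bounds h
      rw [findminindxLoop_step arr k low high minidx h]
      generalize hg : PySem.Int.floordiv (low + high) 2 = mid at hmid ⊢
      clear hg
      have hmid0 : 0 ≤ mid := by omega
      have hmidlt : mid.toNat < arr.length := by omega
      have hmidcast : (mid.toNat : Int) = mid := by omega
      have hv : PySem.List.pyGetD arr mid 0 = arr[mid.toNat] :=
        PySem.List.pyGetD_eq_getElem arr 0 hmid0 (by push_cast; omega)
      rw [hv]
      -- monotone access: mid.toNat ≤ j → arr[mid.toNat] ≤ arr[j]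
      have hmono : ∀ j : Nat, (hj : j < arr.length) → mid.toNat ≤ j →
          arr[mid.toNat] ≤ arr[j] := by
        intro j hj hmj
        rcases Nat.eq_or_lt_of_le hmj with hEq | hLt
        · exact le_of_eq (by congr 1)
        · exact hsort _ _ _ hj hLt
      have hmono' : ∀ j : Nat, (hj : j < arr.length) → j ≤ mid.toNat →
          arr[j] ≤ arr[mid.toNat] := by
        intro j hj hmj
        rcases Nat.eq_or_lt_of_le hmj with hEq | hLt
        · exact le_of_eq (by congr 1)
        · exact hsort _ _ _ hmidlt hLt
      by_cases hge : arr[mid.toNat] ≥ k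
      · rw [if_pos hge]
        apply ih low (mid - 1) _ (by omega) h0 (by omega) (by omega) hI2
        · -- I3 for the smaller right boundary
          intro j hj hgt
          exact le_trans hge (hmono j hj (by omega))
        · -- I4 for the smaller right boundary
          by_cases hvk : arr[mid.toNat] = k
          · rw [if_pos hvk]
            right
            refine ⟨by omega, by omega, ?_⟩
            have : (mid - 1 + 1).toNat = mid.toNat := by omega
            rw [this]
            exact ⟨hmidlt, hvk⟩
          · rw [if_neg hvk]
            have hgt : k < arr[mid.toNat] := lt_of_le_of_ne hge (fun h' => hvk h'.symm)
            left
            constructor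
            · -- minidx must still be -1: the right disjunct of hI4 contradicts v > k
              rcases hI4 with ⟨hmi, _⟩ | ⟨_, _, hjlt, heq⟩
              · exact hmi
              · exfalso
                have := hmono (high + 1).toNat hjlt (by omega)
                rw [heq] at this
                omega
            · intro j hj hgt'
              have := hmono j hj (by omega)
              omega
      · rw [if_neg hge]
        have hfuel : (high + 1 - (mid + 1)).toNat ≤ n := fuelLemma hmid hn
        have hlo0 : (0:Int) ≤ mid + 1 := by omega
        have hle' : mid + 1 ≤ high + 1 := by omega
        apply ih (mid + 1) high minidx hfuel hlo0 hhi hle'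
        · -- I2 for the larger left boundary
          intro j hj hlt
          have := hmono' j hj (by omega)
          omega
        · exact hI3
        · exact hI4
    · rw [findminindxLoop, dif_neg h]
      exact findminindxLoop_exit arr k low high minidx h hle hI2 hI4

-- When k does not occur, minidx is never set and the loop returns -1 (indices stay in range).
lemma findminindxLoop_notmem (arr : List Int) (k : Int) (hk : k ∉ arr) :
    ∀ (n : Nat) (low high : Int), (high + 1 - low).toNat ≤ n →
      0 ≤ low → high ≤ (arr.length : Int) - 1 →
      findminindxLoop arr k low high (-1) = -1 := by
  intro n
  induction n with
  | zero =>
    intro low high hn h0 hhi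
    rw [findminindxLoop, dif_neg (by omega : ¬ low ≤ high)]
  | succ n ih =>
    intro low high hn h0 hhi
    by_cases h : low ≤ high
    · have hmid := PySem.Int.floordiv_two_mid_bounds h
      rw [findminindxLoop_step arr k low high (-1) h]
      generalize hg : PySem.Int.floordiv (low + high) 2 = mid at hmid ⊢
      clear hg
      have hmid0 : (0:Int) ≤ mid := by omega
      have hv : PySem.List.pyGetD arr mid 0 = arr[mid.toNat] :=
        PySem.List.pyGetD_eq_getElem arr 0 hmid0 (by omega)
      have hne : arr[mid.toNat]'(by omega) ≠ k := fun hEq => hk (hEq ▸ List.getElem_mem _)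
      rw [hv, if_neg hne]
      by_cases hge : arr[mid.toNat]'(by omega) ≥ k
      · rw [if_pos hge]
        exact ih low (mid - 1) (fuelLemma' hmid hn) h0 (by omega)
      · rw [if_neg hge]
        exact ih (mid + 1) high (fuelLemma hmid hn) (by omega) hhi
    · rw [findminindxLoop, dif_neg h]

-- ===== VERDICT (by name: the statement is the Claim_ definition above) =====
theorem findminindx_spec : Claim_equal_findminindx := by
  intro arr k _ hpre
  unfold Spec_findminindx findminindx findminindx_alt
  rcases hpre with hpre | hpre
  case inr =>
    rw [findminindxGo_eq, if_neg hpre,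
      findminindxLoop_notmem arr k hpre ((arr.length : Int) - 1 + 1 - 0).toNat 0
        ((arr.length : Int) - 1) (le_refl _) (by omega) (by omega)]
  rw [findminindxGo_eq,
    findminindxLoop_eq arr k hpre ((arr.length : Int) - 1 + 1 - 0).toNat 0
      ((arr.length : Int) - 1) (-1) (le_refl _) (by omega) (by omega) (by omega)
      (fun j hj hlt => absurd hlt (by omega))
      (fun j hj hgt => absurd hgt (by omega))
      (Or.inl ⟨rfl, fun j hj hgt => absurd hgt (by omega)⟩)]
  simp
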